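-- pv_equiv track=rewrite | github.com/raphaelchristi/harness-evolver | tools/archive_search.py | snippet_from
-- ===== SOURCE A (Python) =====
-- def snippet_from(text, qtokens, radius=120, max_len=300):
--     """Pick a small window around the first query-token hit."""
--     if not text:
--         return ""
--     lower = text.lower()
--     best = -1
--     for tok in qtokens:
--         i = lower.find(tok)
--         if i >= 0 and (best < 0 or i < best):
--             best = i
--     if best < 0:
--         return text[:max_len].strip()
--     start = max(0, best - radius)
--     end = min(len(text), best + radius)
--     slice_ = text[start:end].strip()
--     if len(slice_) > max_len:
--         slice_ = slice_[:max_len]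
--     return ("…" if start > 0 else "") + slice_ + ("…" if end < len(text) else "")
-- ===== SOURCE B (Python) =====
-- def snippet_from(text, qtokens, radius=120, max_len=300):
--     """Pick a small window around the first query-token hit.
--
--     Single left-to-right scan: walk the lowercased text once and stop at the
--     first position where any query token starts, instead of running a separate
--     find() per token and minimising.
--     """
--     if not text:
--         return ""
--     lower = text.lower()
--     n = len(lower)
--     best = -1
--     for pos in range(n):
--         if any(lower.startswith(tok, pos) for tok in qtokens):
--             best = pos
--             break
--     if best < 0:
--         return text[:max_len].strip()
--     start = max(0, best - radius)
--     end = min(n, best + radius)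
--     window = text[start:end].strip()[:max_len]
--     prefix = "…" if start > 0 else ""
--     suffix = "…" if end < n else ""
--     return prefix + window + suffix
-- ===== Notes on version B (the rewrite author's own statement) =====
-- stated objective: alternative
-- what changed: A runs a separate full lower.find(tok) pass for every token and minimises the hit indices; B walks the lowercased text once left-to-right and stops at the first position where any token starts (early exit at the leftmost hit), and applies the max_len truncation unconditionally instead of behind a length test.
import Mathlib
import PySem

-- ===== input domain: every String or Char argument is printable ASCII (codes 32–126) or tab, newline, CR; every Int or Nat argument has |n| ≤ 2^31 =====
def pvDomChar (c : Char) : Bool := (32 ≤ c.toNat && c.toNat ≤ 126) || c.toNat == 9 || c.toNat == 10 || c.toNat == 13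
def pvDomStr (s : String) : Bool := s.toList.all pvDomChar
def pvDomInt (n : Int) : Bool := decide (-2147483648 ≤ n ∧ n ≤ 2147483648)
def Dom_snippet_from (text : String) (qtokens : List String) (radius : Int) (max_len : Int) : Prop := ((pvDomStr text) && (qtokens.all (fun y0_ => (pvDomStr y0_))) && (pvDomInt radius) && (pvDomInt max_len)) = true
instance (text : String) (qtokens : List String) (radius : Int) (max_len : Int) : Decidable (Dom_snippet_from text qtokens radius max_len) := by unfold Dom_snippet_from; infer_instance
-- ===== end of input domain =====

-- B replaces A's per-token find()+minimise search by a single left-to-right scan of the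
-- lowercased text stopping at the first position where any token starts (objective: alternative).

-- ===== PORT A =====
def snippet_from (text : String) (qtokens : List String) (radius : Int) (max_len : Int) : String :=
  if text = "" then ""
  else
    let lower := PySem.Str.lower text
    let best : Int := qtokens.foldl (fun best tok =>
      if 0 ≤ PySem.Str.find lower tok ∧ (best < 0 ∨ PySem.Str.find lower tok < best)
      then PySem.Str.find lower tok else best) (-1)
    if best < 0 then
      PySem.Str.strip (PySem.Str.slice text none (some max_len))
    else
      let start := max 0 (best - radius)
      let stop := min (PySem.Str.len text) (best + radius)
      let slice0 := PySem.Str.strip (PySem.Str.slice text (some start) (some stop))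
      let slice1 := if max_len < PySem.Str.len slice0
                    then PySem.Str.slice slice0 none (some max_len) else slice0
      (if 0 < start then "…" else "") ++ slice1 ++
        (if stop < PySem.Str.len text then "…" else "")

-- ===== PORT B =====
-- B's scan loop: walk the text once, return the first position where some token starts.
def pvScanHit (qtoks : List (List Char)) : List Char → Int → Option Int
  | [], _ => none
  | c :: rest, pos =>
    if qtoks.any (fun tok => PySem.Chars.startswith (c :: rest) tok) then some pos
    else pvScanHit qtoks rest (pos + 1)

def snippet_from_alt (text : String) (qtokens : List String) (radius : Int) (max_len : Int) : String :=
  if text = "" then ""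
  else
    let lower := PySem.Str.lower text
    let n := PySem.Str.len lower
    match pvScanHit (qtokens.map String.toList) lower.toList 0 with
    | none => PySem.Str.strip (PySem.Str.slice text none (some max_len))
    | some best =>
      let start := max 0 (best - radius)
      let stop := min n (best + radius)
      let window := PySem.Str.slice
        (PySem.Str.strip (PySem.Str.slice text (some start) (some stop))) none (some max_len)
      let pre := if 0 < start then "…" else ""
      let suf := if stop < n then "…" else ""
      pre ++ window ++ suf

-- ===== PRECONDITION & SPEC =====
def Spec_snippet_from (text : String) (qtokens : List String) (radius : Int) (max_len : Int) (out : String) : Prop := out = snippet_from_alt text qtokens radius max_len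
instance (text : String) (qtokens : List String) (radius : Int) (max_len : Int) (out : String) : Decidable (Spec_snippet_from text qtokens radius max_len out) := by unfold Spec_snippet_from; infer_instance

-- ===== CLAIM (what is proved, stated in full; the proofs are below) =====
def Claim_equal_snippet_from : Prop := ∀ (text : String) (qtokens : List String) (radius : Int) (max_len : Int), Dom_snippet_from text qtokens radius max_len → Spec_snippet_from text qtokens radius max_len (snippet_from text qtokens radius max_len)

-- ===== LEMMAS AND PROOFS =====

theorem pvStringExt {s t : String} (h : s.toList = t.toList) : s = t := by
  have := congrArg String.ofList h; simpa using this

-- A's fold computes the minimum of the non-negative find values (or stays -1).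
theorem pvFoldA_spec (f : String → Int) (hf : ∀ t, -1 ≤ f t) (toks : List String) :
    ∀ acc : Int, -1 ≤ acc →
      (-1 ≤ toks.foldl (fun best tok =>
          if 0 ≤ f tok ∧ (best < 0 ∨ f tok < best) then f tok else best) acc) ∧
      (toks.foldl (fun best tok =>
          if 0 ≤ f tok ∧ (best < 0 ∨ f tok < best) then f tok else best) acc = acc ∨
        ∃ t ∈ toks, toks.foldl (fun best tok =>
          if 0 ≤ f tok ∧ (best < 0 ∨ f tok < best) then f tok else best) acc = f t) ∧
      (∀ t ∈ toks, 0 ≤ f t →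
        0 ≤ toks.foldl (fun best tok =>
          if 0 ≤ f tok ∧ (best < 0 ∨ f tok < best) then f tok else best) acc ∧
        toks.foldl (fun best tok =>
          if 0 ≤ f tok ∧ (best < 0 ∨ f tok < best) then f tok else best) acc ≤ f t) ∧
      (0 ≤ acc →
        0 ≤ toks.foldl (fun best tok =>
          if 0 ≤ f tok ∧ (best < 0 ∨ f tok < best) then f tok else best) acc ∧
        toks.foldl (fun best tok =>
          if 0 ≤ f tok ∧ (best < 0 ∨ f tok < best) then f tok else best) acc ≤ acc) := by
  induction toks with
  | nil => intro acc hacc; simp [List.foldl]; omega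
  | cons t ts ih =>
    intro acc hacc
    simp only [List.foldl_cons]
    by_cases hc : 0 ≤ f t ∧ (acc < 0 ∨ f t < acc)
    · rw [if_pos hc]
      obtain ⟨h1, h2, h3, h4⟩ := ih (f t) (hf t)
      refine ⟨h1, ?_, ?_, ?_⟩
      · rcases h2 with h2 | ⟨t', ht', h2⟩
        · exact Or.inr ⟨t, List.mem_cons_self .., h2⟩
        · exact Or.inr ⟨t', List.mem_cons_of_mem _ ht', h2⟩
      · intro t' ht' hft'
        rcases List.mem_cons.1 ht' with rfl | ht'
        · have := h4 hc.1; omega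
        · exact h3 t' ht' hft'
      · intro _; have := h4 hc.1; omega
    · rw [if_neg hc]
      obtain ⟨h1, h2, h3, h4⟩ := ih acc hacc
      refine ⟨h1, ?_, ?_, h4⟩
      · rcases h2 with h2 | ⟨t', ht', h2⟩
        · exact Or.inl h2
        · exact Or.inr ⟨t', List.mem_cons_of_mem _ ht', h2⟩
      · intro t' ht' hft'
        rcases List.mem_cons.1 ht' with rfl | ht'
        · have hacc0 : 0 ≤ acc ∧ acc ≤ f t' := by omega
          have := h4 hacc0.1; omega
        · exact h3 t' ht' hft'

theorem pvScanHit_none (qt : List (List Char)) :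
    ∀ (cs : List Char) (pos : Int),
      (∀ (j : Nat), ∀ t ∈ qt, ¬ t <+: cs.drop j) → pvScanHit qt cs pos = none := by
  intro cs
  induction cs with
  | nil => intro pos _; rfl
  | cons c rest ih =>
    intro pos h
    have hany : qt.any (fun tok => PySem.Chars.startswith (c :: rest) tok) = false := by
      rw [List.any_eq_false]
      intro t ht
      rw [Bool.not_eq_true, ← Bool.not_eq_true] at *
      intro hsw
      exact h 0 t ht ((PySem.Chars.startswith_iff _ _).1 hsw)
    simp only [pvScanHit, hany, Bool.false_eq_true, if_false]
    exact ih (pos + 1) (fun j t ht => h (j + 1) t ht)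

theorem pvScanHit_some (qt : List (List Char)) :
    ∀ (cs : List Char) (j : Nat) (pos : Int), j < cs.length →
      (∃ t ∈ qt, t <+: cs.drop j) →
      (∀ i : Nat, i < j → ∀ t ∈ qt, ¬ t <+: cs.drop i) →
      pvScanHit qt cs pos = some (pos + j) := by
  intro cs
  induction cs with
  | nil => intro j pos hj; simp at hj
  | cons c rest ih =>
    intro j pos hj hhit hmin
    match j with
    | 0 =>
      obtain ⟨t, ht, hp⟩ := hhit
      have hany : qt.any (fun tok => PySem.Chars.startswith (c :: rest) tok) = true := by
        rw [List.any_eq_true]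
        exact ⟨t, ht, (PySem.Chars.startswith_iff _ _).2 hp⟩
      simp [pvScanHit, hany]
    | j' + 1 =>
      have hany : qt.any (fun tok => PySem.Chars.startswith (c :: rest) tok) = false := by
        rw [List.any_eq_false]
        intro t ht
        rw [Bool.not_eq_true, ← Bool.not_eq_true]
        intro hsw
        exact hmin 0 (by omega) t ht ((PySem.Chars.startswith_iff _ _).1 hsw)
      simp only [pvScanHit, hany, Bool.false_eq_true, if_false]
      have := ih j' (pos + 1) (by simpa using hj)
        (by simpa using hhit)
        (fun i hi t ht => hmin (i + 1) (by omega) t ht)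
      rw [this]; congr 1; push_cast; ring

-- length is preserved by lowercasing
theorem pvLenLower (text : String) : PySem.Str.len (PySem.Str.lower text) = PySem.Str.len text := by
  simp [PySem.Str.len_eq, PySem.Str.toList_lower, PySem.Chars.lower]

-- s[:m] = s when len(s) ≤ m
theorem pvSliceAll (s : String) (m : Int) (h : PySem.Str.len s ≤ m) :
    PySem.Str.slice s none (some m) = s := by
  apply pvStringExt
  rw [PySem.Str.toList_slice, PySem.Chars.slice_eq_listSlice]
  have hl := PySem.Str.len_eq s
  have h0 : (0 : Int) ≤ m := by omega
  rw [PySem.List.slice_to _ h0]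
  exact List.take_of_length_le (by omega)

-- The scan finds exactly A's best index.
theorem pvSearchAgree (lw : String) (qtokens : List String) (hlw : lw.toList ≠ []) :
    pvScanHit (qtokens.map String.toList) lw.toList 0 =
      (if (qtokens.foldl (fun best tok =>
            if 0 ≤ PySem.Str.find lw tok ∧ (best < 0 ∨ PySem.Str.find lw tok < best)
            then PySem.Str.find lw tok else best) (-1)) < 0
       then none
       else some (qtokens.foldl (fun best tok =>
            if 0 ≤ PySem.Str.find lw tok ∧ (best < 0 ∨ PySem.Str.find lw tok < best)
            then PySem.Str.find lw tok else best) (-1))) := by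
  set f : String → Int := fun tok => PySem.Str.find lw tok with hf_def
  have hf : ∀ t, -1 ≤ f t := fun t => PySem.Chars.neg_one_le_find _ _
  have hfind : ∀ t : String, f t = PySem.Chars.find lw.toList t.toList := fun t => by
    simp [hf_def, PySem.Str.find]
  set b : Int := qtokens.foldl (fun best tok =>
      if 0 ≤ f tok ∧ (best < 0 ∨ f tok < best) then f tok else best) (-1) with hb_def
  obtain ⟨h1, h2, h3, _⟩ := pvFoldA_spec f hf qtokens (-1) (by omega)
  rw [← hb_def] at h1 h2 h3
  by_cases hb : b < 0
  · rw [if_pos hb]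
    apply pvScanHit_none
    intro j t ht hpre
    obtain ⟨t₀, ht₀, rfl⟩ := List.mem_map.1 ht
    have hinf : t₀.toList <:+: lw.toList :=
      (PySem.Chars.isIn_iff_infix _ _).1
        ((PySem.Chars.exists_prefix_drop_iff_isIn _ _).1 ⟨j, hpre⟩)
    have : 0 ≤ f t₀ := by rw [hfind]; exact (PySem.Chars.find_nonneg_iff _ _).2 hinf
    have := (h3 t₀ ht₀ this).1
    omega
  · rw [if_neg hb]
    have hb0 : 0 ≤ b := by omega
    rcases h2 with h2 | ⟨t₁, ht₁, h2⟩
    · omega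
    have hb1 : 0 ≤ PySem.Chars.find lw.toList t₁.toList := by rw [← hfind, ← h2]; exact hb0
    obtain ⟨hpre, hmin₁⟩ := PySem.Chars.find_spec hb1
    have hbfind : PySem.Chars.find lw.toList t₁.toList = b := by rw [← hfind, ← h2]
    rw [hbfind] at hpre hmin₁
    have hle : b ≤ (lw.toList.length : Int) := by
      rw [← hbfind]; exact PySem.Chars.find_le_length _ _
    have hj : b.toNat < lw.toList.length := by
      by_contra hc
      have hdrop : lw.toList.drop b.toNat = [] := List.drop_of_length_le (by omega)
      rw [hdrop] at hpre
      have ht0 : t₁.toList = [] := List.prefix_nil.1 hpre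
      rw [ht0, PySem.Chars.find_nil] at hbfind
      have : lw.toList.length = 0 := by omega
      exact hlw (List.eq_nil_of_length_eq_zero this)
    have := pvScanHit_some (qtokens.map String.toList) lw.toList b.toNat 0 hj
      ⟨t₁.toList, List.mem_map_of_mem ht₁, hpre⟩
      (by
        intro i hi t ht hpre'
        obtain ⟨t₀, ht₀, rfl⟩ := List.mem_map.1 ht
        have hinf : t₀.toList <:+: lw.toList :=
          (PySem.Chars.isIn_iff_infix _ _).1
            ((PySem.Chars.exists_prefix_drop_iff_isIn _ _).1 ⟨i, hpre'⟩)
        have hpos : 0 ≤ f t₀ := by rw [hfind]; exact (PySem.Chars.find_nonneg_iff _ _).2 hinf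
        have hble := (h3 t₀ ht₀ hpos).2
        obtain ⟨_, hmin₀⟩ := PySem.Chars.find_spec (by rw [← hfind]; exact hpos)
        exact hmin₀ i (by rw [← hfind]; omega) hpre')
    rw [this]
    congr 1
    omega

-- ===== VERDICT (by name: the statement is the Claim_ definition above) =====
theorem snippet_from_spec : Claim_equal_snippet_from := by
  intro text qtokens radius max_len _
  unfold Spec_snippet_from snippet_from snippet_from_alt
  by_cases h : text = ""
  · simp [h]
  · rw [if_neg h, if_neg h]
    simp only []
    have htl : text.toList ≠ [] := by
      intro hn
      exact h (pvStringExt (by rw [hn]; rfl))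
    have hlw : (PySem.Str.lower text).toList ≠ [] := by
      rw [PySem.Str.toList_lower]
      simp [PySem.Chars.lower, htl]
    rw [pvSearchAgree (PySem.Str.lower text) qtokens hlw]
    by_cases hb : (qtokens.foldl (fun best tok =>
        if 0 ≤ PySem.Str.find (PySem.Str.lower text) tok ∧
            (best < 0 ∨ PySem.Str.find (PySem.Str.lower text) tok < best)
        then PySem.Str.find (PySem.Str.lower text) tok else best) (-1)) < 0
    · rw [if_pos hb, if_pos hb]
    · rw [if_neg hb, if_neg hb]
      simp only []
      rw [pvLenLower]
      by_cases hml : max_len < PySem.Str.len (PySem.Str.strip (PySem.Str.slice text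
          (some (max 0 ((qtokens.foldl (fun best tok =>
            if 0 ≤ PySem.Str.find (PySem.Str.lower text) tok ∧
                (best < 0 ∨ PySem.Str.find (PySem.Str.lower text) tok < best)
            then PySem.Str.find (PySem.Str.lower text) tok else best) (-1)) - radius)))
          (some (min (PySem.Str.len text) ((qtokens.foldl (fun best tok =>
            if 0 ≤ PySem.Str.find (PySem.Str.lower text) tok ∧
                (best < 0 ∨ PySem.Str.find (PySem.Str.lower text) tok < best)
            then PySem.Str.find (PySem.Str.lower text) tok else best) (-1)) + radius)))))
      · rw [if_pos hml]
      · rw [if_neg hml, pvSliceAll _ _ (not_lt.mp hml)]
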